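-- pv_equiv track=rewrite | github.com/JaneLi99/Leetcode_Practice | Get_Minimum_Cost.py | getMinimumCost
-- ===== SOURCE A (Python) =====
-- def getMinimumCost(parcels, k):
--     if len(parcels) == k:
--         return 0
--
--     res = []
--     parcels.sort()
--     num = 1
--     while len(res) < k - len(parcels):
--         if num not in parcels:
--             res.append(num)
--         num = num + 1
--     return sum(res)
-- ===== SOURCE B (Python) =====
-- def getMinimumCost(parcels, k):
--     # Return-value equivalence only: A sorts `parcels` in place, B does not mutate it.
--     need = k - len(parcels)
--     if need <= 0:
--         return 0
--     present = sorted({p for p in parcels if p >= 1})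
--     prev = 0            # largest integer already accounted for
--     used = 0            # sum of present values <= prev
--     for p in present:
--         gap = p - prev - 1          # count of missing integers in (prev, p)
--         if need <= gap:
--             t = prev + need
--             return t * (t + 1) // 2 - used
--         need -= gap
--         used += p
--         prev = p
--     t = prev + need
--     return t * (t + 1) // 2 - used
-- ===== Notes on version B (the rewrite author's own statement) =====
-- stated objective: faster
-- what changed: A greedily enumerates candidates 1,2,3,... and sums the ones absent from the list; B never enumerates candidates: it walks the gaps between the sorted distinct positive parcels and computes the answer by a triangular-number closed form T*(T+1)//2 minus the sum of present values below the cutoff T (B also does not mutate `parcels`, which A sorts in place).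
import Mathlib
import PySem

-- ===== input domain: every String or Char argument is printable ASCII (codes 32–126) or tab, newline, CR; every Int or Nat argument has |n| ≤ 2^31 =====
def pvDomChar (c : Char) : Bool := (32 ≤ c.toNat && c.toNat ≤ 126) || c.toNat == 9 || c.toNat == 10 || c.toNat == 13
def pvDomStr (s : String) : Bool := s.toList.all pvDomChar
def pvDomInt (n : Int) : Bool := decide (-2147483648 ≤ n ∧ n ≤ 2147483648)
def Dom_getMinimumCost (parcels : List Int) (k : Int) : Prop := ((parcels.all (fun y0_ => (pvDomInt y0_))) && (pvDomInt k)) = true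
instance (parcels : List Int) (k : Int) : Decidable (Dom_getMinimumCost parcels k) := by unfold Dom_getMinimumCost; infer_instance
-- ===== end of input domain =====

-- B replaces A's per-candidate enumeration by a gap-walk over the sorted distinct positive
-- parcels with a triangular-number closed form; equivalence is about the RETURN value only
-- (A sorts `parcels` in place, B does not mutate it).

-- ===== PORT A =====
-- bound on the elements, used only for the termination measure of A's while loop
def pvBound (ps : List Int) : Int := ps.foldr (fun a b => max a b) 0 + 1

theorem lt_pvBound {ps : List Int} {x : Int} (h : x ∈ ps) : x < pvBound ps := by
  induction ps with
  | nil => cases h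
  | cons a t ih =>
    rw [List.mem_cons] at h
    simp only [pvBound, List.foldr_cons] at ih ⊢
    rcases h with rfl | h
    · omega
    · have := ih h; omega

-- the while loop of A: res accumulates the missing numbers, num counts up.
-- res is kept in REVERSE order (append = cons) so each append is O(1) as in Python,
-- and cnt maintains len(res) in O(1) as Python's len is; the caller reverses res
-- back and takes sum(res) as a left fold (Python's sum adds left to right).
def aLoop (ps : List Int) (target : Int) (res : List Int) (cnt : Nat) (num : Int) : List Int :=
  if (cnt : Int) < target then
    if num ∉ ps then aLoop ps target (num :: res) (cnt + 1) (num + 1)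
    else aLoop ps target res cnt (num + 1)
  else res
termination_by ((target - cnt).toNat, (pvBound ps - num).toNat)
decreasing_by
  · apply Prod.Lex.left
    omega
  · have hb : num < pvBound ps := lt_pvBound (by simpa using ‹¬ num ∉ ps›)
    apply Prod.Lex.right
    omega

def getMinimumCost (parcels : List Int) (k : Int) : Int :=
  if (parcels.length : Int) = k then 0
  else
    let ps := PySem.List.sorted parcels (fun x => x) false
    (aLoop ps (k - (parcels.length : Int)) [] 0 1).reverse.foldl (· + ·) 0

-- ===== PORT B =====
-- the for-loop of B: walk the gaps between consecutive distinct positive parcels;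
-- prev = largest integer accounted for, used = sum of present values ≤ prev.
def bWalk (present : List Int) (prev need used : Int) : Int :=
  match present with
  | [] =>
    let t := prev + need
    PySem.Int.floordiv (t * (t + 1)) 2 - used
  | p :: rest =>
    let gap := p - prev - 1
    if need ≤ gap then
      let t := prev + need
      PySem.Int.floordiv (t * (t + 1)) 2 - used
    else bWalk rest p (need - gap) (used + p)

def getMinimumCost_alt (parcels : List Int) (k : Int) : Int :=
  let need := k - (parcels.length : Int)
  if need ≤ 0 then 0
  else
    let present := PySem.List.sorted (PySem.Set.ofList (parcels.filter (fun p => 1 ≤ p))) (fun x => x) false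
    bWalk present 0 need 0

-- ===== PRECONDITION & SPEC =====
def Spec_getMinimumCost (parcels : List Int) (k : Int) (out : Int) : Prop := out = getMinimumCost_alt parcels k
instance (parcels : List Int) (k : Int) (out : Int) : Decidable (Spec_getMinimumCost parcels k out) := by unfold Spec_getMinimumCost; infer_instance

-- ===== CLAIM (what is proved, stated in full; the proofs are below) =====
def Claim_equal_getMinimumCost : Prop := ∀ (parcels : List Int) (k : Int), Dom_getMinimumCost parcels k → Spec_getMinimumCost parcels k (getMinimumCost parcels k)

-- ===== LEMMAS AND PROOFS =====

-- reference value: sum of the first `need` integers ≥ num that are not in ps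
def pickSum (ps : List Int) (need : Int) (num : Int) : Int :=
  if 0 < need then
    if num ∈ ps then pickSum ps need (num + 1)
    else num + pickSum ps (need - 1) (num + 1)
  else 0
termination_by (need.toNat, (pvBound ps - num).toNat)
decreasing_by
  · have hb : num < pvBound ps := lt_pvBound ‹num ∈ ps›
    apply Prod.Lex.right; omega
  · apply Prod.Lex.left; omega

theorem aLoop_sum (ps : List Int) :
    ∀ target res cnt num, (aLoop ps target res cnt num).sum = res.sum + pickSum ps (target - cnt) num := by
  intro target res cnt num
  fun_induction aLoop ps target res cnt num with
  | case1 res cnt num hlt hmem ih =>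
    conv_rhs => rw [pickSum]
    have hpos : 0 < target - (cnt : Int) := by omega
    rw [if_pos hpos, if_neg hmem]
    have harg : (target - ((cnt + 1 : Nat) : Int)) = target - (cnt : Int) - 1 := by
      push_cast; ring
    rw [ih, harg, List.sum_cons]
    ring
  | case2 res cnt num hlt hmem ih =>
    conv_rhs => rw [pickSum]
    have hpos : 0 < target - (cnt : Int) := by omega
    have hmem' : num ∈ ps := not_not.mp hmem
    rw [if_pos hpos, if_pos hmem']
    exact ih
  | case3 res cnt num hlt =>
    conv_rhs => rw [pickSum]
    have h0 : ¬ 0 < target - (cnt : Int) := by omega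
    rw [if_neg h0]
    simp

-- pickSum only queries membership at values ≥ num
theorem pickSum_congr_ge (ps qs : List Int) :
    ∀ need num, (∀ x : Int, num ≤ x → (x ∈ ps ↔ x ∈ qs)) → pickSum ps need num = pickSum qs need num := by
  intro need num
  fun_induction pickSum ps need num with
  | case1 need num hpos hmem ih =>
    intro h
    conv_rhs => rw [pickSum]
    rw [if_pos hpos, if_pos ((h num le_rfl).mp hmem)]
    exact ih (fun x hx => h x (by omega))
  | case2 need num hpos hmem ih =>
    intro h
    conv_rhs => rw [pickSum]
    rw [if_pos hpos, if_neg (fun hq => hmem ((h num le_rfl).mpr hq))]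
    rw [ih (fun x hx => h x (by omega))]
  | case3 need num hpos =>
    intro _
    conv_rhs => rw [pickSum]
    rw [if_neg hpos]

-- when no element of ps is among the queried values, pickSum behaves as on []
theorem pickSum_no (ps : List Int) :
    ∀ need num, (∀ x ∈ ps, num + need ≤ x) → pickSum ps need num = pickSum [] need num := by
  intro need num
  fun_induction pickSum ps need num with
  | case1 need num hpos hmem ih =>
    intro h
    have := h num hmem
    omega
  | case2 need num hpos hmem ih =>
    intro h
    conv_rhs => rw [pickSum]
    rw [if_pos hpos, if_neg (by simp)]
    rw [ih (fun x hx => by have := h x hx; omega)]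
  | case3 need num hpos =>
    intro _
    conv_rhs => rw [pickSum]
    rw [if_neg hpos]

-- closed form of the empty-list pickSum (doubled, to stay division-free)
theorem pickSum_nil_double : ∀ need num : Int, 0 ≤ need →
    2 * pickSum [] need num = need * (2 * num + need - 1) := by
  intro need num
  fun_induction pickSum ([] : List Int) need num with
  | case1 need num hpos hmem ih => simp at hmem
  | case2 need num hpos hmem ih =>
    intro _
    have h1 := ih (by omega)
    have e : need * (2 * num + need - 1)
        = 2 * num + (need - 1) * (2 * (num + 1) + (need - 1) - 1) := by ring
    rw [e]
    linarith
  | case3 need num hpos =>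
    intro h
    have : need = 0 := by omega
    subst this
    simp

theorem fdiv_tri (n : Int) : 2 * PySem.Int.floordiv (n * (n + 1)) 2 = n * (n + 1) := by
  obtain ⟨r, hr⟩ := Int.even_mul_succ_self n
  have h2 : n * (n + 1) = 2 * r := by omega
  rw [h2, PySem.Int.floordiv_eq_ediv_of_pos (by omega), Int.mul_ediv_cancel_left _ (by omega)]

-- triangular identity: sum of the `r` integers prev+1 … prev+r
theorem tri_eq (prev r : Int) (h : 0 ≤ r) :
    PySem.Int.floordiv ((prev + r) * (prev + r + 1)) 2
      = pickSum [] r (prev + 1) + PySem.Int.floordiv (prev * (prev + 1)) 2 := by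
  have h1 := fdiv_tri (prev + r)
  have h2 := fdiv_tri prev
  have h3 := pickSum_nil_double r (prev + 1) h
  have e : (prev + r) * (prev + r + 1) = r * (2 * (prev + 1) + r - 1) + prev * (prev + 1) := by ring
  linarith

-- passing a present value p: the candidates prev+1 … p-1 are all taken, p is skipped
theorem pickSum_through (ps : List Int) (p : Int) (hlow : ∀ x ∈ ps, p ≤ x) (hp : p ∈ ps) :
    ∀ num need, num ≤ p → p - num < need →
      pickSum ps need num = pickSum [] (p - num) num + pickSum ps (need - (p - num)) (p + 1) := by
  intro num need hnp hlt
  induction hd : (p - num).toNat generalizing num need with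
  | zero =>
    have hnum : num = p := by omega
    subst hnum
    rw [pickSum, if_pos (by omega), if_pos hp]
    have e : num - num = (0:Int) := by ring
    rw [e, sub_zero]
    conv_rhs => rw [pickSum]
    simp
  | succ d ih =>
    have hlt' : num < p := by omega
    have hmem : num ∉ ps := fun hx => by have := hlow num hx; omega
    rw [pickSum, if_pos (by omega), if_neg hmem]
    rw [ih (num + 1) (need - 1) (by omega) (by omega) (by omega)]
    conv_rhs => rw [pickSum]
    rw [if_pos (by omega), if_neg (by simp)]
    have e1 : p - (num + 1) = p - num - 1 := by ring
    rw [e1]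
    have e2 : need - 1 - (p - num - 1) = need - (p - num) := by ring
    rw [e2]
    ring

-- the main correspondence: bWalk computes pickSum via the closed form
theorem bWalk_eq (present : List Int) (hs : present.Pairwise (· < ·)) :
    ∀ prev need used, 0 ≤ prev → 0 < need → (∀ x ∈ present, prev < x) →
      bWalk present prev need used
        = pickSum present need (prev + 1) + PySem.Int.floordiv (prev * (prev + 1)) 2 - used := by
  induction present with
  | nil =>
    intro prev need used hprev hneed hgt
    simp only [bWalk]
    rw [tri_eq prev need (by omega)]
  | cons p rest ih =>
    intro prev need used hprev hneed hgt
    have hp : prev < p := hgt p (by simp)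
    have hrest_gt : ∀ x ∈ rest, p < x := by
      intro x hx
      exact (List.pairwise_cons.mp hs).1 x hx
    simp only [bWalk]
    by_cases hle : need ≤ p - prev - 1
    · rw [if_pos hle]
      have hno : pickSum (p :: rest) need (prev + 1) = pickSum [] need (prev + 1) := by
        apply pickSum_no
        intro x hx
        rcases List.mem_cons.mp hx with rfl | hx'
        · omega
        · have := hrest_gt x hx'; omega
      rw [hno, tri_eq prev need (by omega)]
    · rw [if_neg hle]
      have hlow : ∀ x ∈ (p :: rest), p ≤ x := by
        intro x hx
        rcases List.mem_cons.mp hx with rfl | hx'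
        · exact le_rfl
        · exact le_of_lt (hrest_gt x hx')
      have hth := pickSum_through (p :: rest) p hlow (by simp) (prev + 1) need (by omega) (by omega)
      have hcg : pickSum (p :: rest) (need - (p - (prev + 1))) (p + 1)
          = pickSum rest (need - (p - (prev + 1))) (p + 1) := by
        apply pickSum_congr_ge
        intro x hx
        simp only [List.mem_cons]
        constructor
        · rintro (rfl | h)
          · omega
          · exact h
        · intro h; exact Or.inr h
      rw [ih (List.pairwise_cons.mp hs).2 p (need - (p - prev - 1)) (used + p) (by omega) (by omega) hrest_gt]
      have e3 : need - (p - (prev + 1)) = need - (p - prev - 1) := by ring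
      rw [hth, hcg, e3]
      have e7 : p - (prev + 1) = p - prev - 1 := by ring
      rw [e7]
      have htri := tri_eq prev (p - prev - 1) (by omega)
      have e6 : prev + (p - prev - 1) = p - 1 := by ring
      rw [e6] at htri
      have hfp := fdiv_tri p
      have hfp1 := fdiv_tri (p - 1)
      have e5 : (p - 1) * (p - 1 + 1) = p * (p + 1) - 2 * p := by ring
      linarith

-- ===== VERDICT (by name: the statement is the Claim_ definition above) =====
theorem getMinimumCost_spec : Claim_equal_getMinimumCost := by
  intro parcels k _
  unfold Spec_getMinimumCost getMinimumCost getMinimumCost_alt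
  by_cases hk : (parcels.length : Int) = k
  · simp [hk]
  · rw [if_neg hk]
    show (aLoop (PySem.List.sorted parcels (fun x => x) false)
        (k - (parcels.length : Int)) [] 0 1).reverse.foldl (· + ·) 0
      = if k - (parcels.length : Int) ≤ 0 then 0
        else bWalk (PySem.List.sorted (PySem.Set.ofList (parcels.filter (fun p => 1 ≤ p))) (fun x => x) false) 0 (k - (parcels.length : Int)) 0
    by_cases hle : k - (parcels.length : Int) ≤ 0
    · rw [if_pos hle]
      rw [← List.sum_eq_foldl, List.sum_reverse, aLoop.eq_def]
      have h0 : ¬ ((parcels.length : Int) < k) := by omega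
      simp [h0]
    · rw [if_neg hle]
      rw [← List.sum_eq_foldl, List.sum_reverse, aLoop_sum]
      have hpair : (PySem.List.sorted (PySem.Set.ofList (parcels.filter (fun p => 1 ≤ p))) (fun x => x) false).Pairwise (· < ·) :=
        PySem.List.sorted_ofList_pairwise_lt _
      rw [bWalk_eq _ hpair 0 (k - (parcels.length : Int)) 0 le_rfl (by omega)
        (by intro x hx
            simp [PySem.List.mem_sorted, PySem.Set.mem_ofList, List.mem_filter] at hx
            omega)]
      simp only [List.sum_nil, Nat.cast_zero, sub_zero, zero_add]
      have hcg : pickSum (PySem.List.sorted parcels (fun x => x) false) (k - (parcels.length : Int)) 1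
          = pickSum (PySem.List.sorted (PySem.Set.ofList (parcels.filter (fun p => 1 ≤ p))) (fun x => x) false) (k - (parcels.length : Int)) 1 := by
        apply pickSum_congr_ge
        intro x hx
        simp [PySem.List.mem_sorted, PySem.Set.mem_ofList, List.mem_filter]
        omega
      have h1 : PySem.Int.floordiv ((0 : Int) * 1) 2 = 0 := by decide
      rw [h1, add_zero]
      exact hcg
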